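-- pv_equiv track=rewrite | github.com/15779833106/homework_test | 22 快速排序.py | Nk
-- ===== SOURCE A (Python) =====
-- def Nk(a,k):
--     res=a[:k]
--     for i in range(k,len(a)):
--         max = res[0]
--         n=0
--         for j in range(k):
--             if res[j]>max:
--                 max=res[j]
--                 n=j
--         if a[i] < max:
--             res[n]=a[i]
--     return res
-- ===== SOURCE B (Python) =====
-- def _inspos(ps, p):
--     lo, hi = 0, len(ps)
--     while lo < hi:
--         mid = (lo + hi) // 2
--         if p < ps[mid]:
--             hi = mid
--         else:
--             lo = mid + 1
--     return lo
--
-- def Nk(a, k):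
--     ps = []
--     for s, v in enumerate(a[:k]):
--         p = (v, -s)
--         ps.insert(_inspos(ps, p), p)
--     for x in a[k:]:
--         vmax, negs = ps[-1]
--         if x < vmax:
--             ps.pop()
--             p = (x, negs)
--             ps.insert(_inspos(ps, p), p)
--     res = [0] * len(ps)
--     for v, negs in ps:
--         res[-negs] = v
--     return res
-- ===== Notes on version B (the rewrite author's own statement) =====
-- stated objective: faster
-- what changed: B keeps the kept elements as a lexicographically sorted pool of (value, -slot) pairs, so each incoming element is checked against the maximum in O(1) and a replacement is a binary-search ordered insert, with the slot array rebuilt once at the end, instead of A's O(k) argmax scan of the slot array for every incoming element.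
-- outside the precondition, e.g. on Nk([3, 1, 4], -1): A returns [1, 1], B returns [3, 1]; on Nk([], 0): A returns [], B returns []
import Mathlib
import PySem

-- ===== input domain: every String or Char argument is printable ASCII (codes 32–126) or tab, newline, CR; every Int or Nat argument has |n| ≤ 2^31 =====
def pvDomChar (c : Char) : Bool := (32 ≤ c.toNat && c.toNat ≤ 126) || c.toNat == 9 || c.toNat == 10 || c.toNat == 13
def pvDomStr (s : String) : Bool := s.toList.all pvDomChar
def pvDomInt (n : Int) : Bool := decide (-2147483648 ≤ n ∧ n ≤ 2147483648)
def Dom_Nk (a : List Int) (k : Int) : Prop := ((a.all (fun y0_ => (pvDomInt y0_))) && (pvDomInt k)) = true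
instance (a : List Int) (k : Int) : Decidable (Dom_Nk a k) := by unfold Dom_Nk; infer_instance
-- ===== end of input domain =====

-- B replaces A's per-element argmax scan of the slot array by a lexicographically
-- sorted pool of (value, -slot) pairs (max read off the end, ordered re-insert),
-- rebuilding the slot array once at the end: an alternative algorithm, same results.

-- ===== PORT A =====
def Nk (a : List Int) (k : Int) : List Int :=
  let res0 := PySem.List.slice a none (some k)            -- res = a[:k]
  (PySem.List.pyRange k (PySem.List.len a) 1).foldl (fun res i =>
    -- max = res[0]; n = 0; for j in range(k): if res[j] > max: max = res[j]; n = j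
    let mn := (PySem.List.pyRange 0 k 1).foldl
      (fun (p : Int × Int) j =>
        if PySem.List.pyGetD res j 0 > p.1 then (PySem.List.pyGetD res j 0, j) else p)
      (PySem.List.pyGetD res 0 0, 0)
    -- if a[i] < max: res[n] = a[i]
    if PySem.List.pyGetD a i 0 < mn.1 then PySem.List.pySetD res mn.2 (PySem.List.pyGetD a i 0) else res)
    res0

-- ===== PORT B =====
-- _inspos ps p: binary search for the first position whose pair is (tuple-)greater than p
def insposLoop (ps : List (Int × Int)) (p : Int × Int) (lo hi : Nat) : Nat :=
  if _h : lo < hi then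
    let mid := (lo + hi) / 2
    let q := PySem.List.pyGetD ps (mid : Int) ((0 : Int), (0 : Int))
    -- "p < ps[mid]" is Python's lexicographic tuple comparison, written out
    if p.1 < q.1 ∨ (p.1 = q.1 ∧ p.2 < q.2) then insposLoop ps p lo mid
    else insposLoop ps p (mid + 1) hi
  else lo
termination_by hi - lo
decreasing_by
  · omega
  · omega

def inspos (ps : List (Int × Int)) (p : Int × Int) : Nat :=
  insposLoop ps p 0 ps.length

def Nk_alt (a : List Int) (k : Int) : List Int :=
  -- ps = []; for s, v in enumerate(a[:k]): p = (v, -s); ps.insert(_inspos(ps, p), p)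
  let ps0 := (PySem.List.enumerate (PySem.List.slice a none (some k)) 0).foldl
      (fun ps sv =>
        let p := (sv.2, -sv.1)
        PySem.List.insert ps ((inspos ps p : Nat) : Int) p) []
  -- for x in a[k:]: vmax, negs = ps[-1]
  --                 if x < vmax: ps.pop(); p = (x, negs); ps.insert(_inspos(ps, p), p)
  let ps := (PySem.List.slice a (some k) none).foldl (fun ps x =>
      let top := PySem.List.pyGetD ps (-1) ((0 : Int), (0 : Int))
      if x < top.1 then
        let ps1 := ps.dropLast   -- ps.pop(), result discarded (exact: ps ≠ [] under Pre_)
        let p := (x, top.2)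
        PySem.List.insert ps1 ((inspos ps1 p : Nat) : Int) p
      else ps) ps0
  -- res = [0] * len(ps); for v, negs in ps: res[-negs] = v
  ps.foldl (fun res p => PySem.List.pySetD res (-p.2) p.1) (List.replicate ps.length 0)

-- ===== PRECONDITION & SPEC =====
-- Pre_ excludes k ≤ 0, the meaningless "keep at most zero elements" calls: there A
-- usually raises IndexError (res[0] on an emptied res), and where it does return, the
-- value comes from negative-index wraparound re-scanning the prefix — accidental.
def Pre_Nk (a : List Int) (k : Int) : Prop := 1 ≤ k
instance (a : List Int) (k : Int) : Decidable (Pre_Nk a k) := by unfold Pre_Nk; infer_instance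
def pvWitness_Nk : List Int × Int := ([3, 1, 2], 2)

def Spec_Nk (a : List Int) (k : Int) (out : List Int) : Prop := out = Nk_alt a k
instance (a : List Int) (k : Int) (out : List Int) : Decidable (Spec_Nk a k out) := by unfold Spec_Nk; infer_instance

-- ===== CLAIM (what is proved, stated in full; the proofs are below) =====
def Claim_equal_Nk : Prop := ∀ (a : List Int) (k : Int), Dom_Nk a k → Pre_Nk a k → Spec_Nk a k (Nk a k)

-- ===== LEMMAS AND PROOFS =====

-- the sorted-insert that _inspos + list.insert implement (proof-side reference)
def insort (ps : List (Int × Int)) (p : Int × Int) : List (Int × Int) :=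
  match ps with
  | [] => [p]
  | q :: t => if p.1 < q.1 ∨ (p.1 = q.1 ∧ p.2 < q.2) then p :: q :: t else q :: insort t p

-- strict lexicographic < on pairs (the comparison "p < q" above)
def Llt (p q : Int × Int) : Prop := p.1 < q.1 ∨ (p.1 = q.1 ∧ p.2 < q.2)

-- the pool entries that correspond to a slot array: (value, -slot)
def entries (res : List Int) : List (Int × Int) := res.zipIdx.map (fun q => (q.1, -(q.2 : Int)))

-- lexicographic ≤ on pairs (Python tuple order)
def Lle (p q : Int × Int) : Prop := p.1 < q.1 ∨ (p.1 = q.1 ∧ p.2 ≤ q.2)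

theorem length_entries (res : List Int) : (entries res).length = res.length := by
  simp [entries]

theorem getElem_entries (res : List Int) (j : Nat) (h : j < res.length) :
    (entries res)[j]'(by simpa [length_entries] using h) = (res[j], -(j : Int)) := by
  simp [entries, List.getElem_zipIdx]

theorem mem_entries_iff (res : List Int) (p : Int × Int) :
    p ∈ entries res ↔ ∃ j : Nat, ∃ h : j < res.length, p = (res[j], -(j : Int)) := by
  constructor
  · intro hp
    rcases List.getElem_of_mem hp with ⟨j, hj, hget⟩
    have hj' : j < res.length := by simpa [length_entries] using hj
    exact ⟨j, hj', by rw [← hget, getElem_entries res j hj']⟩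
  · rintro ⟨j, hj, rfl⟩
    have : (entries res)[j]'(by simpa [length_entries] using hj) = (res[j], -(j : Int)) :=
      getElem_entries res j hj
    exact this ▸ List.getElem_mem _

theorem insort_perm (l : List (Int × Int)) (p : Int × Int) : (insort l p).Perm (p :: l) := by
  induction l with
  | nil => simp [insort]
  | cons q t ih =>
    by_cases h : p.1 < q.1 ∨ (p.1 = q.1 ∧ p.2 < q.2)
    · simp [insort, h]
    · simp only [insort, if_neg h]
      exact ((ih.cons q).trans (List.Perm.swap p q t))

theorem mem_insort {l : List (Int × Int)} {p x : Int × Int} :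
    x ∈ insort l p ↔ x = p ∨ x ∈ l := by
  rw [(insort_perm l p).mem_iff]; simp

theorem Lle_trans' {p q r : Int × Int} (h1 : Lle p q) (h2 : Lle q r) : Lle p r := by
  rcases h1 with h1 | ⟨e1, h1⟩ <;> rcases h2 with h2 | ⟨e2, h2⟩ <;>
    simp only [Lle] <;> omega

theorem insort_pairwise {l : List (Int × Int)} (p : Int × Int)
    (hl : l.Pairwise Lle) : (insort l p).Pairwise Lle := by
  induction l with
  | nil => simp [insort]
  | cons q t ih =>
    rcases List.pairwise_cons.mp hl with ⟨hq, ht⟩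
    by_cases h : p.1 < q.1 ∨ (p.1 = q.1 ∧ p.2 < q.2)
    · simp only [insort, if_pos h]
      refine List.pairwise_cons.mpr ⟨?_, hl⟩
      intro x hx
      have hpq : Lle p q := by rcases h with h | ⟨e, h⟩ <;> simp only [Lle] <;> omega
      rcases List.mem_cons.mp hx with rfl | hx
      · exact hpq
      · exact Lle_trans' hpq (hq x hx)
    · simp only [insort, if_neg h]
      refine List.pairwise_cons.mpr ⟨?_, ih ht⟩
      intro x hx
      rcases mem_insort.mp hx with rfl | hx
      · have h1 : ¬ x.1 < q.1 := fun hh => h (Or.inl hh)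
        simp only [Lle]
        by_cases he : x.1 = q.1
        · have h2 : ¬ x.2 < q.2 := fun hh => h (Or.inr ⟨he, hh⟩)
          exact Or.inr ⟨he.symm, by omega⟩
        · exact Or.inl (by omega)
      · exact hq x hx

theorem Lle_refl' (p : Int × Int) : Lle p p := Or.inr ⟨rfl, le_refl _⟩

theorem Llt_Lle_trans {p q r : Int × Int} (h1 : Llt p q) (h2 : Lle q r) : Llt p r := by
  rcases h1 with h1 | ⟨e1, h1⟩ <;> rcases h2 with h2 | ⟨e2, h2⟩ <;>
    simp only [Llt] <;> omega

theorem pairwise_getElem_Lle {ps : List (Int × Int)} (hs : ps.Pairwise Lle)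
    {i j : Nat} (hij : i ≤ j) (hj : j < ps.length) : Lle ps[i] ps[j] := by
  rcases Nat.lt_or_ge i j with h | h
  · exact List.pairwise_iff_getElem.mp hs i j (by omega) hj h
  · have : i = j := by omega
    subst this
    exact Lle_refl' _

theorem insposLoop_spec (ps : List (Int × Int)) (p : Int × Int) (hs : ps.Pairwise Lle) :
    ∀ (n lo hi : Nat), hi - lo ≤ n → lo ≤ hi → hi ≤ ps.length →
      (∀ j (hj : j < ps.length), j < lo → ¬ Llt p ps[j]) →
      (∀ j (hj : j < ps.length), hi ≤ j → Llt p ps[j]) →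
      insposLoop ps p lo hi ≤ ps.length ∧
        (∀ j (hj : j < ps.length), j < insposLoop ps p lo hi → ¬ Llt p ps[j]) ∧
        (∀ j (hj : j < ps.length), insposLoop ps p lo hi ≤ j → Llt p ps[j]) := by
  intro n
  induction n with
  | zero =>
    intro lo hi hn hle hlen hbef haft
    have : ¬ lo < hi := by omega
    rw [insposLoop, dif_neg this]
    exact ⟨by omega, fun j hj hjlo => hbef j hj hjlo, fun j hj hjlo => haft j hj (by omega)⟩
  | succ n ih =>
    intro lo hi hn hle hlen hbef haft
    by_cases hlt : lo < hi
    · rw [insposLoop, dif_pos hlt]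
      have hmid : (lo + hi) / 2 < ps.length := by omega
      have hq : PySem.List.pyGetD ps (((lo + hi) / 2 : Nat) : Int) ((0 : Int), (0 : Int))
          = ps[(lo + hi) / 2] := by
        rw [PySem.List.pyGetD_natCast, List.getD_eq_getElem _ _ hmid]
      simp only [hq]
      by_cases hc : Llt p ps[(lo + hi) / 2]
      · rw [if_pos (by simpa [Llt] using hc)]
        refine ih lo ((lo + hi) / 2) (by omega) (by omega) (by omega) hbef ?_
        intro j hj hjge
        exact Llt_Lle_trans hc (pairwise_getElem_Lle hs hjge hj)
      · rw [if_neg (by simpa [Llt] using hc)]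
        refine ih ((lo + hi) / 2 + 1) hi (by omega) (by omega) hlen ?_ haft
        intro j hj hjlt hcon
        exact hc (Llt_Lle_trans hcon (pairwise_getElem_Lle hs (by omega) hmid))
    · rw [insposLoop, dif_neg hlt]
      exact ⟨by omega, fun j hj hjlo => hbef j hj hjlo,
        fun j hj hjlo => haft j hj (by omega)⟩

theorem insort_eq_take_drop : ∀ (ps : List (Int × Int)) (p : Int × Int) (r : Nat),
    r ≤ ps.length →
    (∀ j (hj : j < ps.length), j < r → ¬ Llt p ps[j]) →
    (∀ j (hj : j < ps.length), r ≤ j → Llt p ps[j]) →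
    insort ps p = ps.take r ++ p :: ps.drop r
  | [], p, r, hr, _, _ => by
    have : r = 0 := by simpa using hr
    subst this
    simp [insort]
  | q :: t, p, 0, _, _, hat => by
    have h0 : Llt p q := by simpa using hat 0 (by simp) (by omega)
    simp only [insort]
    rw [if_pos (by simpa [Llt] using h0)]
    simp
  | q :: t, p, r + 1, hr, hbef, hat => by
    have h0 : ¬ Llt p q := by simpa using hbef 0 (by simp) (by omega)
    simp only [insort]
    rw [if_neg (by simpa [Llt] using h0)]
    rw [insort_eq_take_drop t p r (by simpa using hr)
      (fun j hj hjr => by simpa using hbef (j + 1) (by simpa using hj) (by omega))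
      (fun j hj hjr => by simpa using hat (j + 1) (by simpa using hj) (by omega))]
    simp

theorem insert_inspos_eq_insort (ps : List (Int × Int)) (p : Int × Int)
    (hs : ps.Pairwise Lle) :
    PySem.List.insert ps ((inspos ps p : Nat) : Int) p = insort ps p := by
  obtain ⟨h1, h2, h3⟩ := insposLoop_spec ps p hs ps.length 0 ps.length (by omega) (by omega)
    (le_refl _) (fun j hj hj0 => absurd hj0 (by omega)) (fun j hj hge => absurd hj (by omega))
  have hpos : inspos ps p = insposLoop ps p 0 ps.length := rfl
  rw [hpos] at *
  rw [PySem.List.insert_natCast ps _ p h1]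
  exact (insort_eq_take_drop ps p _ h1 h2 h3).symm

-- A's inner loop as a fold over enumerate
def argA (res : List Int) : Int × Int :=
  (PySem.List.enumerate res 0).foldl
    (fun (p : Int × Int) jv => if jv.2 > p.1 then (jv.2, jv.1) else p)
    (PySem.List.pyGetD res 0 0, 0)

theorem argA_spec (res : List Int) (hne : res ≠ []) :
    ∃ n : Nat, (argA res).2 = (n : Int) ∧ ∃ hn : n < res.length,
      res[n] = (argA res).1 ∧
      (∀ j : Nat, ∀ hj : j < res.length, res[j] ≤ (argA res).1) ∧
      (∀ j : Nat, ∀ hj : j < res.length, res[j] = (argA res).1 → n ≤ j) := by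
  induction res using List.reverseRecOn with
  | nil => exact absurd rfl hne
  | append_singleton ys x ih =>
    rcases eq_or_ne ys [] with rfl | hys
    · have hx : argA ([] ++ [x]) = (x, 0) := by
        simp [argA, PySem.List.enumerate_cons, PySem.List.enumerate_nil, PySem.List.pyGetD_zero]
      refine ⟨0, by rw [hx]; simp, by simp, by rw [hx]; simp, ?_, ?_⟩
      · intro j hj
        have : j = 0 := by simp at hj; omega
        subst this
        rw [hx]; simp
      · intro j hj hje; omega
    · have hinit : PySem.List.pyGetD (ys ++ [x]) 0 0 = PySem.List.pyGetD ys 0 0 := by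
        rcases ys with _ | ⟨y, t⟩
        · exact absurd rfl hys
        · simp [PySem.List.pyGetD_zero]
      have henum : PySem.List.enumerate (ys ++ [x]) 0
          = PySem.List.enumerate ys 0 ++ [((ys.length : Int), x)] := by
        rw [PySem.List.enumerate_append]
        simp [PySem.List.enumerate_cons, PySem.List.enumerate_nil]
      have hfold : argA (ys ++ [x])
          = (fun (p : Int × Int) (jv : Int × Int) => if jv.2 > p.1 then (jv.2, jv.1) else p)
              (argA ys) ((ys.length : Int), x) := by
        simp only [argA, hinit, henum, List.foldl_append, List.foldl_cons, List.foldl_nil]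
      rcases ih hys with ⟨n, hN, hn, hval, hmax, hfirst⟩
      by_cases hgt : x > (argA ys).1
      · refine ⟨ys.length, ?_, by simp, ?_, ?_, ?_⟩
        · rw [hfold]; simp [hgt]
        · rw [hfold]; simp [hgt]
        · intro j hj
          rw [hfold]; simp only [if_pos hgt]
          rcases Nat.lt_or_ge j ys.length with hj' | hj'
          · rw [List.getElem_append_left hj']
            exact le_of_lt (lt_of_le_of_lt (hmax j hj') hgt)
          · have : j = ys.length := by simp at hj; omega
            subst this
            simp
        · intro j hj hje
          rcases Nat.lt_or_ge j ys.length with hj' | hj'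
          · exfalso
            rw [List.getElem_append_left hj'] at hje
            rw [hfold] at hje; simp only [if_pos hgt] at hje
            have := hmax j hj'; omega
          · exact hj'
      · have hkeep : argA (ys ++ [x]) = argA ys := by
          rw [hfold]; simp [hgt]
        refine ⟨n, by rw [hkeep]; exact hN, by simp; omega, ?_, ?_, ?_⟩
        · rw [hkeep, List.getElem_append_left hn]; exact hval
        · intro j hj
          rw [hkeep]
          rcases Nat.lt_or_ge j ys.length with hj' | hj'
          · rw [List.getElem_append_left hj']; exact hmax j hj'
          · have : j = ys.length := by simp at hj; omega
            subst this
            simp; omega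
        · intro j hj hje
          rw [hkeep] at hje
          rcases Nat.lt_or_ge j ys.length with hj' | hj'
          · rw [List.getElem_append_left hj'] at hje
            exact hfirst j hj' hje
          · have hnn : n < ys.length := hn
            omega

theorem entries_ne_nil {res : List Int} (h : res ≠ []) : entries res ≠ [] := by
  intro hc
  apply h
  have hl : res.length = 0 := by
    simpa [length_entries] using congrArg List.length hc
  exact List.eq_nil_of_length_eq_zero hl

-- the last element of the sorted pool is (max value, -(first argmax slot))
theorem getLast_of_sorted_perm {res : List Int} {ps : List (Int × Int)}
    (hne : res ≠ []) (hs : ps.Pairwise Lle) (hp : ps.Perm (entries res))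
    (hpse : ps ≠ []) :
    ps.getLast hpse = ((argA res).1, -(argA res).2) := by
  obtain ⟨n, hN, hn, hval, hmax, hfirst⟩ := argA_spec res hne
  have hlmem : ps.getLast hpse ∈ ps := List.getLast_mem hpse
  obtain ⟨j0, hj0, hj0e⟩ := (mem_entries_iff res _).mp (hp.subset hlmem)
  have hall : ∀ p ∈ ps, Lle p (ps.getLast hpse) := by
    intro p hpm
    have hdec : ps = ps.dropLast ++ [ps.getLast hpse] :=
      (List.dropLast_append_getLast hpse).symm
    rw [hdec] at hpm
    rcases List.mem_append.mp hpm with hd | hl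
    · have hs' := hs
      rw [hdec] at hs'
      exact (List.pairwise_append.mp hs').2.2 p hd _ (List.mem_singleton_self _)
    · rw [List.mem_singleton.mp hl]
      exact Or.inr ⟨rfl, le_refl _⟩
  have hMmem : (res[n], -(n : Int)) ∈ ps :=
    hp.mem_iff.mpr ((mem_entries_iff res _).mpr ⟨n, hn, rfl⟩)
  have hle := hall _ hMmem
  rw [hj0e] at hle
  have hj0M : res[j0] ≤ (argA res).1 := hmax j0 hj0
  rcases hle with hlt | ⟨heq', hle'⟩
  · exfalso
    simp only at hlt
    rw [hval] at hlt
    omega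
  · simp only at heq' hle'
    have hup : n ≤ j0 := hfirst j0 hj0 (by rw [← heq', hval])
    have hdown : j0 ≤ n := by omega
    have hj0n : j0 = n := le_antisymm hdown hup
    subst hj0n
    rw [hj0e, hN, hval]

-- B-side: replacing the evicted maximum matches A's slot assignment
theorem set_perm_entries {res : List Int} {ps : List (Int × Int)} (x : Int) {n : Nat}
    (hn : n < res.length) (hp : ps.Perm (entries res)) (hpse : ps ≠ [])
    (hlast : ps.getLast hpse = (res[n], -(n : Int))) :
    (insort ps.dropLast (x, -(n : Int))).Perm (entries (res.set n x)) := by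
  have hn' : n < (entries res).length := by simpa [length_entries] using hn
  have hes : entries (res.set n x) = (entries res).set n (x, -(n : Int)) := by
    apply List.ext_getElem
    · simp [length_entries]
    · intro j h1 h2
      have hj : j < res.length := by simpa [length_entries] using h1
      have hjs : j < (res.set n x).length := by simpa using hj
      rw [getElem_entries (res.set n x) j hjs, List.getElem_set, List.getElem_set]
      by_cases hjn : n = j
      · subst hjn; simp
      · rw [if_neg hjn, if_neg hjn, getElem_entries res j hj]
  have h1 : (entries res).set n (x, -(n : Int))
      = (entries res).take n ++ (x, -(n : Int)) :: (entries res).drop (n + 1) := by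
    rw [List.set_eq_take_append_cons_drop, if_pos hn']
  have h2 : entries res
      = (entries res).take n ++ (res[n], -(n : Int)) :: (entries res).drop (n + 1) := by
    conv_lhs => rw [← List.take_append_drop n (entries res)]
    rw [List.drop_eq_getElem_cons hn', getElem_entries res n hn]
  have pA : ((entries res).set n (x, -(n : Int))).Perm
      ((x, -(n : Int)) :: ((entries res).take n ++ (entries res).drop (n + 1))) := by
    rw [h1]; exact List.perm_middle
  have pB : (entries res).Perm
      ((res[n], -(n : Int)) :: ((entries res).take n ++ (entries res).drop (n + 1))) := by
    conv_lhs => rw [h2]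
    exact List.perm_middle
  have hps : ps = ps.dropLast ++ [(res[n], -(n : Int))] := by
    conv_lhs => rw [← List.dropLast_append_getLast hpse]
    rw [hlast]
  have pC : ps.Perm ((res[n], -(n : Int)) :: ps.dropLast) := by
    conv_lhs => rw [hps]
    exact List.perm_append_singleton _ _
  have pD : ps.dropLast.Perm ((entries res).take n ++ (entries res).drop (n + 1)) :=
    List.Perm.cons_inv (pC.symm.trans (hp.trans pB))
  rw [hes]
  exact (insort_perm _ _).trans ((pD.cons _).trans pA.symm)

-- writing the pool back slot by slot recovers the slot array
theorem zip_write : ∀ (xs pre suf : List Int), xs.length ≤ suf.length →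
    (xs.zipIdx pre.length).foldl (fun r q => r.set q.2 q.1) (pre ++ suf)
      = pre ++ xs ++ suf.drop xs.length
  | [], pre, suf, h => by simp
  | v :: xs, pre, suf, h => by
    rcases suf with _ | ⟨w, suf⟩
    · simp at h
    · rw [List.zipIdx_cons, List.foldl_cons]
      have hset : (pre ++ w :: suf).set pre.length v = (pre ++ [v]) ++ suf := by
        simp
      have hlen : pre.length + 1 = (pre ++ [v]).length := by simp
      have ih := zip_write xs (pre ++ [v]) suf (by simp at h ⊢; omega)
      rw [hset, hlen, ih]
      simp

theorem reconstruct {res : List Int} {ps : List (Int × Int)} (hp : ps.Perm (entries res)) :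
    ps.foldl (fun r p => PySem.List.pySetD r (-p.2) p.1) (List.replicate ps.length 0) = res := by
  have hlen : ps.length = res.length := by rw [hp.length_eq, length_entries]
  have hcongr : ps.foldl (fun r p => PySem.List.pySetD r (-p.2) p.1) (List.replicate ps.length 0)
      = ps.foldl (fun r p => r.set (-p.2).toNat p.1) (List.replicate ps.length 0) := by
    apply PySem.List.foldl_congr_mem
    intro acc p hpm
    obtain ⟨j, hj, hpe⟩ := (mem_entries_iff res p).mp (hp.subset hpm)
    exact PySem.List.pySetD_of_nonneg _ _ (by rw [hpe]; simp)
  rw [hcongr]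
  have hcomm : ∀ x ∈ ps, ∀ y ∈ ps, ∀ z : List Int,
      (z.set (-x.2).toNat x.1).set (-y.2).toNat y.1
        = (z.set (-y.2).toNat y.1).set (-x.2).toNat x.1 := by
    intro x hx y hy z
    obtain ⟨i, hi, hxe⟩ := (mem_entries_iff res x).mp (hp.subset hx)
    obtain ⟨j, hj, hye⟩ := (mem_entries_iff res y).mp (hp.subset hy)
    by_cases hij : i = j
    · subst hij
      rw [hxe, hye]
    · rw [hxe, hye]
      simp only [neg_neg, Int.toNat_natCast]
      exact List.set_comm _ _ hij
  rw [hp.foldl_eq' hcomm (List.replicate ps.length 0)]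
  simp only [entries, List.foldl_map]
  have hbody : (fun (r : List Int) (q : Int × Nat) =>
      r.set (-(-(q.2 : Int))).toNat q.1) = fun r q => r.set q.2 q.1 := by
    funext r q; simp
  rw [hbody, hlen]
  have := zip_write res [] (List.replicate res.length 0) (by simp)
  simpa using this

-- ===== the two loop bodies, named for the equivalence proof =====
def bodyA (k : Int) (res : List Int) (x : Int) : List Int :=
  let mn := (PySem.List.pyRange 0 k 1).foldl
    (fun (p : Int × Int) j =>
      if PySem.List.pyGetD res j 0 > p.1 then (PySem.List.pyGetD res j 0, j) else p)
    (PySem.List.pyGetD res 0 0, 0)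
  if x < mn.1 then PySem.List.pySetD res mn.2 x else res

def bodyB (ps : List (Int × Int)) (x : Int) : List (Int × Int) :=
  let top := PySem.List.pyGetD ps (-1) ((0 : Int), (0 : Int))
  if x < top.1 then
    let ps1 := ps.dropLast
    let p := (x, top.2)
    PySem.List.insert ps1 ((inspos ps1 p : Nat) : Int) p
  else ps

def initB (t : List Int) : List (Int × Int) :=
  (PySem.List.enumerate t 0).foldl
    (fun ps sv =>
      let p := (sv.2, -sv.1)
      PySem.List.insert ps ((inspos ps p : Nat) : Int) p) []

theorem NkA_eq (a : List Int) (k : Int) (hk0 : 0 ≤ k) :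
    Nk a k = List.foldl (bodyA k) (a.take k.toNat) (a.drop k.toNat) := by
  have h1 : Nk a k
      = List.foldl (bodyA k) (PySem.List.slice a none (some k)) (List.drop k.toNat a) :=
    PySem.List.foldl_pyRange_pyGetD a 0 (bodyA k) _ hk0
  rw [h1, PySem.List.slice_to a hk0]

theorem NkAlt_eq (a : List Int) (k : Int) (hk0 : 0 ≤ k) :
    Nk_alt a k =
      (fun ps : List (Int × Int) =>
        ps.foldl (fun res p => PySem.List.pySetD res (-p.2) p.1) (List.replicate ps.length 0))
        ((a.drop k.toNat).foldl bodyB (initB (a.take k.toNat))) := by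
  show (fun ps : List (Int × Int) =>
        ps.foldl (fun res p => PySem.List.pySetD res (-p.2) p.1) (List.replicate ps.length 0))
        ((PySem.List.slice a (some k) none).foldl bodyB
          (initB (PySem.List.slice a none (some k)))) = _
  rw [PySem.List.slice_to a hk0, PySem.List.slice_from a hk0]

theorem foldl_ins_inv (f : Int × Int → Int × Int) :
    ∀ (l : List (Int × Int)) (acc : List (Int × Int)), acc.Pairwise Lle →
      ((l.foldl (fun ps sv =>
          let p := f sv
          PySem.List.insert ps ((inspos ps p : Nat) : Int) p) acc).Pairwise Lle) ∧
      ((l.foldl (fun ps sv =>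
          let p := f sv
          PySem.List.insert ps ((inspos ps p : Nat) : Int) p) acc).Perm (acc ++ l.map f))
  | [], acc, h => ⟨h, by simp⟩
  | x :: l, acc, h => by
    simp only [List.foldl_cons]
    rw [insert_inspos_eq_insort acc (f x) h]
    obtain ⟨hpw, hperm⟩ := foldl_ins_inv f l (insort acc (f x)) (insort_pairwise _ h)
    refine ⟨hpw, hperm.trans ?_⟩
    rw [List.map_cons]
    exact (((insort_perm acc (f x)).append_right _).trans List.perm_middle.symm)

theorem initB_inv (t : List Int) :
    (initB t).Pairwise Lle ∧ (initB t).Perm (entries t) := by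
  have hmap : (PySem.List.enumerate t 0).map (fun sv => (sv.2, -sv.1)) = entries t := by
    induction t using List.reverseRecOn with
    | nil => simp [PySem.List.enumerate_nil, entries]
    | append_singleton ys x ih =>
      rw [PySem.List.enumerate_append, List.map_append, ih]
      simp [PySem.List.enumerate_cons, PySem.List.enumerate_nil, entries, List.zipIdx_append]
  obtain ⟨hpw, hperm⟩ := foldl_ins_inv (fun sv => (sv.2, -sv.1)) (PySem.List.enumerate t 0) []
    List.Pairwise.nil
  exact ⟨by simpa [initB] using hpw, by simpa [initB, hmap] using hperm⟩

theorem bodyA_eq (k : Int) (hk : 1 ≤ k) (res : List Int) (hlen : res.length = k.toNat)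
    (x : Int) :
    bodyA k res x = if x < (argA res).1 then PySem.List.pySetD res (argA res).2 x else res := by
  have hkres : k = PySem.List.len res := by
    rw [PySem.List.len_eq, hlen]; omega
  have hinner : argA res = (PySem.List.pyRange 0 k 1).foldl
      (fun (p : Int × Int) j =>
        if PySem.List.pyGetD res j 0 > p.1 then (PySem.List.pyGetD res j 0, j) else p)
      (PySem.List.pyGetD res 0 0, 0) := by
    unfold argA
    rw [hkres, PySem.List.enumerate_eq_map_pyRange res 0, List.foldl_map]
  unfold bodyA
  rw [← hinner]

theorem step_inv (k : Int) (hk : 1 ≤ k) (res : List Int) (ps : List (Int × Int)) (x : Int)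
    (hlen : res.length = k.toNat) (hpw : ps.Pairwise Lle) (hpm : ps.Perm (entries res)) :
    (bodyA k res x).length = k.toNat ∧ (bodyB ps x).Pairwise Lle ∧
      (bodyB ps x).Perm (entries (bodyA k res x)) := by
  have hne : res ≠ [] := by
    intro h; rw [h] at hlen; simp at hlen; omega
  have hpse : ps ≠ [] := by
    intro h
    rw [h] at hpm
    exact entries_ne_nil hne hpm.nil_eq.symm
  obtain ⟨n, hN, hn, hval, hmax, hfirst⟩ := argA_spec res hne
  have hlast : ps.getLast hpse = ((argA res).1, -(argA res).2) :=
    getLast_of_sorted_perm hne hpw hpm hpse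
  have hdpw : ps.dropLast.Pairwise Lle :=
    List.Pairwise.sublist (List.dropLast_sublist ps) hpw
  rw [bodyA_eq k hk res hlen x]
  unfold bodyB
  rw [PySem.List.pyGetD_neg_one _ _ hpse, hlast]
  simp only
  by_cases hcond : x < (argA res).1
  · rw [if_pos hcond, if_pos hcond]
    rw [insert_inspos_eq_insort ps.dropLast _ hdpw]
    rw [hN, PySem.List.pySetD_of_nonneg res x (by positivity)]
    have hset : ((n : Int)).toNat = n := Int.toNat_natCast n
    rw [hset]
    refine ⟨by simp [hlen], ?_, ?_⟩
    · exact insort_pairwise _ hdpw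
    · exact set_perm_entries x hn hpm hpse (by rw [hlast, hN, hval])
  · rw [if_neg hcond, if_neg hcond]
    exact ⟨hlen, hpw, hpm⟩

theorem main_loop (k : Int) (hk : 1 ≤ k) :
    ∀ (L res : List Int) (ps : List (Int × Int)),
      res.length = k.toNat → ps.Pairwise Lle → ps.Perm (entries res) →
      (L.foldl (bodyA k) res).length = k.toNat ∧ (L.foldl bodyB ps).Pairwise Lle ∧
        (L.foldl bodyB ps).Perm (entries (L.foldl (bodyA k) res))
  | [], res, ps, h1, h2, h3 => ⟨h1, h2, h3⟩
  | x :: L, res, ps, h1, h2, h3 => by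
    rw [List.foldl_cons, List.foldl_cons]
    obtain ⟨g1, g2, g3⟩ := step_inv k hk res ps x h1 h2 h3
    exact main_loop k hk L (bodyA k res x) (bodyB ps x) g1 g2 g3

-- ===== VERDICT (by name: the statement is the Claim_ definition above) =====
theorem Nk_spec : Claim_equal_Nk := by
  unfold Claim_equal_Nk Pre_Nk Spec_Nk
  intro a k _hdom hk
  have hk0 : (0 : Int) ≤ k := by omega
  rw [NkA_eq a k hk0, NkAlt_eq a k hk0]
  obtain ⟨hpw0, hpm0⟩ := initB_inv (a.take k.toNat)
  rcases eq_or_ne (a.drop k.toNat) [] with hLe | hLne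
  · rw [hLe]
    simp only [List.foldl_nil]
    exact (reconstruct hpm0).symm
  · have hlen : (a.take k.toNat).length = k.toNat := by
      have hdl : a.length ≤ k.toNat → a.drop k.toNat = [] := fun h => List.drop_of_length_le h
      have : k.toNat < a.length := by
        by_cases hc : a.length ≤ k.toNat
        · exact absurd (hdl hc) hLne
        · omega
      simp [List.length_take]; omega
    obtain ⟨_, _, hperm⟩ := main_loop k hk (a.drop k.toNat) (a.take k.toNat)
      (initB (a.take k.toNat)) hlen hpw0 hpm0
    exact (reconstruct hperm).symm
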